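-- pv_equiv track=rewrite | github.com/sinhcoshtanh/comp10001 | worksheets/w11.py | repeat_word_count
-- ===== SOURCE A (Python) =====
-- def repeat_word_count(text, n):
--
--     # We create a dictionary of each word's frequency
--     tally = {}
--     for word in text.split():
--         if word not in tally:
--
--             tally[word] = 1
--
--         else:
--             tally[word] += 1
--
--     repeat_list = []
--
--     for word in tally:
--         if tally[word] >= n:
--             repeat_list.append(word)
--
--     return(sorted(repeat_list))
-- ===== SOURCE B (Python) =====
-- def repeat_word_count(text, n):
--     # Sort the words first, then collect run lengths of equal consecutive
--     # words in one pass; the result comes out already sorted.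
--     result = []
--     current = None
--     run = 0
--     for w in sorted(text.split()):
--         if w == current:
--             run += 1
--         else:
--             if current is not None and run >= n:
--                 result.append(current)
--             current = w
--             run = 1
--     if current is not None and run >= n:
--         result.append(current)
--     return result
-- ===== Notes on version B (the rewrite author's own statement) =====
-- stated objective: alternative
-- what changed: Replaces A's dict-based frequency tally followed by a filter pass and a final sort with sorting the words first and a single run-length grouping pass over the sorted list that emits qualifying words already in order, with no dict and no final sort.
import Mathlib
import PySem

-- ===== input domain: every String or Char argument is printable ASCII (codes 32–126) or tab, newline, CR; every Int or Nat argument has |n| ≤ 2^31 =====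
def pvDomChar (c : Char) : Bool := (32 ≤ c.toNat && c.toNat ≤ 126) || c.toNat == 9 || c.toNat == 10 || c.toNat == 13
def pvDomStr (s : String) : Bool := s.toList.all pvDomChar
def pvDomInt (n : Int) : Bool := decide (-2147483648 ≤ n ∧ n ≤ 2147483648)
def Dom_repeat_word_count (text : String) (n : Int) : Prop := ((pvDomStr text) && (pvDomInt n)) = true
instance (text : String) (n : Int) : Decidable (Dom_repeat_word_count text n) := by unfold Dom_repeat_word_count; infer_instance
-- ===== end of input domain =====

-- B replaces A's dict tally + filter + final sort by sort-first then one
-- run-length grouping pass over the sorted words (objective: alternative).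

-- ===== PORT A =====
def repeat_word_count (text : String) (n : Int) : List String :=
  let tally := (PySem.Str.split₀ text).foldl
    (fun tally word =>
      if !tally.contains word then tally.insert word (1 : Int)
      else tally.insert word (tally.getD word 0 + 1))
    PySem.Dict.empty
  let repeat_list := tally.keys.foldl
    (fun repeat_list word =>
      if n ≤ tally.getD word 0 then repeat_list ++ [word] else repeat_list)
    ([] : List String)
  PySem.List.sorted repeat_list (fun x => x) false

-- ===== PORT B =====
-- the trailing 'if current is not None and run >= n: result.append(current)' of Source B
def pvFlush (n : Int) (cur : Option String) (run : Int) (res : List String) : List String :=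
  match cur with
  | some c => if n ≤ run then res ++ [c] else res
  | none => res

def repeat_word_count_alt (text : String) (n : Int) : List String :=
  let st := (PySem.List.sorted (PySem.Str.split₀ text) (fun x => x) false).foldl
    (fun (st : List String × Option String × Int) w =>
      if some w == st.2.1 then (st.1, st.2.1, st.2.2 + 1)
      else (pvFlush n st.2.1 st.2.2 st.1, some w, 1))
    ([], none, 0)
  pvFlush n st.2.1 st.2.2 st.1

-- ===== PRECONDITION & SPEC =====
def Spec_repeat_word_count (text : String) (n : Int) (out : List String) : Prop := out = repeat_word_count_alt text n
instance (text : String) (n : Int) (out : List String) : Decidable (Spec_repeat_word_count text n out) := by unfold Spec_repeat_word_count; infer_instance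

-- ===== CLAIM (what is proved, stated in full; the proofs are below) =====
def Claim_equal_repeat_word_count : Prop := ∀ (text : String) (n : Int), Dom_repeat_word_count text n → Spec_repeat_word_count text n (repeat_word_count text n)

-- ===== LEMMAS AND PROOFS =====

-- proof-side recursive form of B's loop
def pvGroup (n : Int) : List String → Option String → Int → List String → List String
  | [], cur, run, res => pvFlush n cur run res
  | w :: ws, cur, run, res =>
    if some w == cur then pvGroup n ws cur (run + 1) res
    else pvGroup n ws (some w) 1 (pvFlush n cur run res)

theorem pvGroup_eq_foldl (n : Int) (s : List String) : ∀ (cur : Option String) (run : Int) (res : List String),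
    (let st := s.foldl
      (fun (st : List String × Option String × Int) w =>
        if some w == st.2.1 then (st.1, st.2.1, st.2.2 + 1)
        else (pvFlush n st.2.1 st.2.2 st.1, some w, 1))
      (res, cur, run)
     pvFlush n st.2.1 st.2.2 st.1) = pvGroup n s cur run res := by
  induction s with
  | nil => intro cur run res; rfl
  | cons w ws ih =>
    intro cur run res
    simp only [List.foldl_cons, pvGroup]
    by_cases h : some w == cur
    · simp only [h]; exact ih cur (run + 1) res
    · simp only [h]; simp only [Bool.false_eq_true, if_false] at *
      exact ih (some w) 1 (pvFlush n cur run res)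

theorem pvFlush_append (n : Int) (cur : Option String) (run : Int) (res : List String) :
    pvFlush n cur run res = res ++ pvFlush n cur run [] := by
  cases cur <;> simp only [pvFlush] <;> (try split) <;> simp

theorem pvGroup_append (n : Int) (s : List String) : ∀ (cur : Option String) (run : Int) (res : List String),
    pvGroup n s cur run res = res ++ pvGroup n s cur run [] := by
  induction s with
  | nil => intro cur run res; simpa [pvGroup] using pvFlush_append n cur run res
  | cons w ws ih =>
    intro cur run res
    simp only [pvGroup]
    split
    · exact ih cur (run + 1) res
    · rw [ih (some w) 1 (pvFlush n cur run res), ih (some w) 1 (pvFlush n cur run []),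
        pvFlush_append, List.append_assoc]

-- running pvGroup with a current word c below everything in a sorted list
theorem pvGroup_run (n : Int) (s : List String) : ∀ (c : String) (r : Int),
    s.Pairwise (· ≤ ·) → (∀ x ∈ s, c ≤ x) →
    pvGroup n s (some c) r [] =
      (if n ≤ r + (s.count c : Int) then [c] else []) ++ pvGroup n (s.dropWhile (· == c)) none 0 [] := by
  induction s with
  | nil => intro c r _ _; simp [pvGroup, pvFlush]
  | cons w ws ih =>
    intro c r hp hle
    rcases List.pairwise_cons.mp hp with ⟨hw, hws⟩
    by_cases hwc : w = c
    · subst hwc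
      have h1 : pvGroup n (w :: ws) (some w) r [] = pvGroup n ws (some w) (r + 1) [] := by
        simp [pvGroup]
      rw [h1, ih w (r + 1) hws (fun x hx => hle x (List.mem_cons_of_mem _ hx)),
        List.count_cons_self, List.dropWhile_cons_of_pos (by simp)]
      congr 1
      exact if_congr (by push_cast; omega) rfl rfl
    · have hcw : c < w := lt_of_le_of_ne (hle w (List.mem_cons_self)) (fun h => hwc h.symm)
      have hcw' : c ≠ w := fun h => hwc h.symm
      have hcount : (w :: ws).count c = 0 := by
        refine List.count_eq_zero.mpr (fun hc => ?_)
        rcases List.mem_cons.mp hc with rfl | hc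
        · exact hwc rfl
        · exact absurd (lt_of_lt_of_le hcw (hw c hc)) (lt_irrefl c)
      have h1 : pvGroup n (w :: ws) (some c) r [] = pvGroup n ws (some w) 1 (pvFlush n (some c) r []) := by
        simp [pvGroup, hwc]
      have h2 : pvGroup n (w :: ws) none 0 [] = pvGroup n ws (some w) 1 [] := by
        simp [pvGroup, pvFlush]
      have h3 : (w :: ws).dropWhile (· == c) = w :: ws := by
        rw [List.dropWhile_cons_of_neg]; simp [hwc]
      rw [h1, pvGroup_append, h3, h2, hcount]
      congr 1
      simp [pvFlush]

theorem lt_of_mem_dropWhile (s : List String) : ∀ (c : String),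
    s.Pairwise (· ≤ ·) → (∀ x ∈ s, c ≤ x) →
    ∀ x ∈ s.dropWhile (· == c), c < x := by
  induction s with
  | nil => intro c _ _ x hx; simp at hx
  | cons w ws ih =>
    intro c hp hle x hx
    rcases List.pairwise_cons.mp hp with ⟨hw, hws⟩
    by_cases hwc : w = c
    · subst hwc
      rw [List.dropWhile_cons_of_pos (by simp)] at hx
      exact ih w hws (fun y hy => hle y (List.mem_cons_of_mem _ hy)) x hx
    · have hcw : c < w := lt_of_le_of_ne (hle w (List.mem_cons_self)) (fun h => hwc h.symm)
      rw [List.dropWhile_cons_of_neg (by simp [hwc])] at hx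
      rcases List.mem_cons.mp hx with rfl | hx
      · exact hcw
      · exact lt_of_lt_of_le hcw (hw x hx)

-- main characterisation of B's grouping pass on a sorted list
theorem pvGroup_char (n : Int) : ∀ (m : Nat) (s : List String), s.length ≤ m → s.Pairwise (· ≤ ·) →
    (pvGroup n s none 0 []).Pairwise (· < ·) ∧
    (∀ x, x ∈ pvGroup n s none 0 [] ↔ x ∈ s ∧ n ≤ (s.count x : Int)) := by
  intro m
  induction m with
  | zero =>
    intro s hs _
    rw [List.length_eq_zero_iff.mp (Nat.le_zero.mp hs)]
    simp [pvGroup, pvFlush]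
  | succ m ih =>
    intro s hs hp
    match s with
    | [] => simp [pvGroup, pvFlush]
    | w :: ws =>
      rcases List.pairwise_cons.mp hp with ⟨hw, hws⟩
      set t := ws.dropWhile (· == w) with ht
      have hsub : t.Sublist ws := List.dropWhile_sublist _
      have htp : t.Pairwise (· ≤ ·) := hws.sublist hsub
      have htlen : t.length ≤ m := le_trans (List.Sublist.length_le hsub) (by simpa using hs)
      have htgt : ∀ x ∈ t, w < x := lt_of_mem_dropWhile ws w hws hw
      have hstep : pvGroup n (w :: ws) none 0 [] =
          (if n ≤ 1 + (ws.count w : Int) then [w] else []) ++ pvGroup n t none 0 [] := by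
        have h0 : pvGroup n (w :: ws) none 0 [] = pvGroup n ws (some w) 1 [] := by
          simp [pvGroup, pvFlush]
        rw [h0, pvGroup_run n ws w 1 hws hw]
      have hcnt : ∀ x, x ≠ w → ws.count x = t.count x := by
        intro x hx
        conv_lhs => rw [← List.takeWhile_append_dropWhile (l := ws) (p := (· == w))]
        rw [List.count_append, ← ht]
        have : (ws.takeWhile (· == w)).count x = 0 := by
          refine List.count_eq_zero.mpr (fun hc => ?_)
          exact hx (by simpa using List.mem_takeWhile_imp hc)
        omega
      have hmem : ∀ x, x ≠ w → (x ∈ ws ↔ x ∈ t) := by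
        intro x hx
        constructor
        · intro hxs
          conv at hxs => rw [← List.takeWhile_append_dropWhile (l := ws) (p := (· == w))]
          rcases List.mem_append.mp hxs with h | h
          · exact absurd (by simpa using List.mem_takeWhile_imp h) hx
          · exact h
        · intro hxt; exact hsub.mem hxt
      obtain ⟨ihp, ihm⟩ := ih t htlen htp
      constructor
      · rw [hstep]
        refine List.pairwise_append.mpr ⟨?_, ihp, ?_⟩
        · split <;> simp
        · intro a ha b hb
          have ha' : a = w := by revert ha; split <;> simp_all
          subst ha'
          exact htgt b ((ihm b).mp hb).1
      · intro x
        rw [hstep]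
        simp only [List.mem_append]
        constructor
        · rintro (hx | hx)
          · have hxw : x = w := by revert hx; split <;> simp_all
            subst hxw
            have hn : n ≤ 1 + (ws.count x : Int) := by revert hx; split <;> simp_all
            refine ⟨List.mem_cons_self, ?_⟩
            rw [List.count_cons_self]; push_cast; omega
          · obtain ⟨hxt, hxc⟩ := (ihm x).mp hx
            have hxw : x ≠ w := ne_of_gt (htgt x hxt)
            refine ⟨List.mem_cons_of_mem _ ((hmem x hxw).mpr hxt), ?_⟩
            have hc : (w :: ws).count x = t.count x := by
              rw [List.count_cons, hcnt x hxw]; simp [Ne.symm hxw]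
            rw [hc]; exact hxc
        · rintro ⟨hxs, hxc⟩
          by_cases hxw : x = w
          · subst hxw
            left
            rw [List.count_cons_self] at hxc
            have : n ≤ 1 + (ws.count x : Int) := by push_cast at hxc ⊢; omega
            simp [this]
          · right
            have hc : (w :: ws).count x = t.count x := by
              rw [List.count_cons, hcnt x hxw]; simp [Ne.symm hxw]
            rw [hc] at hxc
            exact (ihm x).mpr ⟨(hmem x hxw).mp (List.mem_of_ne_of_mem hxw hxs), hxc⟩

-- A's tally loop is Counter(words)
theorem tally_eq (ws : List String) :
    ws.foldl (fun tally word =>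
      if !tally.contains word then tally.insert word (1 : Int)
      else tally.insert word (tally.getD word 0 + 1)) PySem.Dict.empty
    = PySem.Dict.counter ws := by
  rw [← PySem.Dict.foldl_insert_getD_add_one_eq_counter]
  refine PySem.List.foldl_congr_mem _ _ _ _ (fun d w _ => ?_)
  by_cases h : d.contains w
  · simp [h]
  · simp [h, PySem.Dict.getD_of_not_contains d 0 (by simpa using h)]

-- A computed in closed form
theorem repeat_word_count_eq (text : String) (n : Int) :
    repeat_word_count text n =
      PySem.List.sorted
        ((PySem.Set.ofList (PySem.Str.split₀ text)).filter
          (fun w => decide (n ≤ ((PySem.Str.split₀ text).count w : Int))))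
        (fun x => x) false := by
  unfold repeat_word_count
  rw [tally_eq]
  simp only [PySem.List.foldl_append_ite_eq_filter, PySem.Dict.keys_counter, List.nil_append]
  congr 1
  refine List.filter_congr (fun w _ => ?_)
  simp [PySem.Dict.getD_counter]

-- ===== VERDICT (by name: the statement is the Claim_ definition above) =====
theorem repeat_word_count_spec : Claim_equal_repeat_word_count := by
  intro text n _
  unfold Spec_repeat_word_count
  set ws := PySem.Str.split₀ text with hws
  set s := PySem.List.sorted ws (fun x => x) false with hsdef
  have hperm : s.Perm ws := PySem.List.sorted_perm ws (fun x => x) false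
  have hp : s.Pairwise (· ≤ ·) := PySem.List.sorted_pairwise ws (fun x => x)
  have hB : repeat_word_count_alt text n = pvGroup n s none 0 [] := by
    unfold repeat_word_count_alt
    rw [← hws, ← hsdef]
    exact pvGroup_eq_foldl n s none 0 []
  obtain ⟨hGp, hGm⟩ := pvGroup_char n s.length s le_rfl hp
  rw [repeat_word_count_eq, ← hws, hB]
  refine PySem.List.sorted_eq_of_perm_of_pairwise_lt _ _ _ ?_ hGp
  refine (List.perm_ext_iff_of_nodup (hGp.imp ne_of_lt) ((PySem.Set.nodup_ofList ws).filter _)).mpr ?_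
  intro x
  rw [hGm x, List.mem_filter, PySem.Set.mem_ofList, hperm.mem_iff, hperm.count_eq]
  simp
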